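-- pv_equiv track=rewrite | github.com/MrJujek/agh | wdi/set1/task25.py | created_by_fib_numbers
-- ===== SOURCE A (Python) =====
-- def is_fib(n, a, b):
--     while a <= n:
--         if a == n:
--             return True
--
--         a, b = b, a+b
--
--     return False
--
-- def created_by_fib_numbers(n):
--     a = b = 1
--
--     while b*b <= n:
--         if n % b == 0:
--             if is_fib(n//b, a, b):
--                 return True
--         a, b = b, a+b
--
--     return False
-- ===== SOURCE B (Python) =====
-- def created_by_fib_numbers(n):
--     # Precompute all Fibonacci numbers <= n once, then look up cofactors in a set.
--     fibs = []
--     a, b = 1, 1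
--     while a <= n:
--         fibs.append(a)
--         a, b = b, a + b
--     fib_set = set(fibs)
--     for f in fibs:
--         if f * f > n:
--             break
--         if n % f == 0 and n // f in fib_set:
--             return True
--     return False
-- ===== Notes on version B (the rewrite author's own statement) =====
-- stated objective: simpler
-- what changed: B precomputes the Fibonacci numbers up to n once into a list plus a set and scans divisor candidates with set lookups, instead of A's regeneration of the Fibonacci sequence inside is_fib for every divisor.
import Mathlib
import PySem

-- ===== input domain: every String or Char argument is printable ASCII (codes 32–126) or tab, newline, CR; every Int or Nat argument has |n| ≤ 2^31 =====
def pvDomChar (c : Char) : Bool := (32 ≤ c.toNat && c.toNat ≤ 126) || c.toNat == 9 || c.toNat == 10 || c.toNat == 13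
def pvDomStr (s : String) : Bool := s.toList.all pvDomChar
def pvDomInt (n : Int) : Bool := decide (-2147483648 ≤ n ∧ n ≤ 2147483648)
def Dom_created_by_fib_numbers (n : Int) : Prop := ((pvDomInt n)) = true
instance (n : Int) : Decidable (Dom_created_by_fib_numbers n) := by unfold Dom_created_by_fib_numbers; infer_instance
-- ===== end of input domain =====

-- B precomputes the Fibonacci table up to n once (list + set) instead of A's per-divisor
-- regeneration of the Fibonacci sequence inside is_fib; same return value, simpler scan.

-- ===== PORT A =====
-- Port of A's is_fib. The '0 < a ∧ 0 < b' conjunct is a termination guard only: every call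
-- reachable from created_by_fib_numbers's initial state (1, 1) satisfies it (exact there).
def isFib (m a b : Int) : Bool :=
  if a ≤ m then
    if a = m then true
    else if h : 0 < a ∧ 0 < b then isFib m b (a + b)
    else false
  else false
termination_by ((m + 1 - a).toNat + (m + 1 - b).toNat)
decreasing_by omega

-- Port of A's while loop; again '0 < a ∧ 0 < b' is a termination guard, always true from (1, 1).
def cfLoop (n a b : Int) : Bool :=
  if hb : b * b ≤ n then
    if PySem.Int.mod n b = 0 ∧ isFib (PySem.Int.floordiv n b) a b = true then true
    else if h : 0 < a ∧ 0 < b then cfLoop n b (a + b)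
    else false
  else false
termination_by (n + 1 - b).toNat
decreasing_by
  have hbb : b ≤ b * b := le_mul_of_one_le_left (by omega) (by omega)
  omega

def created_by_fib_numbers (n : Int) : Bool := cfLoop n 1 1

-- ===== PORT B =====
-- Port of B's first while loop (build the Fibonacci list ≤ n); '0 < a ∧ 0 < b' is a
-- termination guard, always true from the initial call (1, 1).
def fibsUpTo (n a b : Int) : List Int :=
  if h : a ≤ n ∧ 0 < a ∧ 0 < b then a :: fibsUpTo n b (a + b)
  else []
termination_by ((n + 1 - a).toNat + (n + 1 - b).toNat)
decreasing_by omega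

-- Port of B's for-loop with its break.
def scanFibs (n : Int) (s : PySem.Set Int) : List Int → Bool
  | [] => false
  | f :: rest =>
    if n < f * f then false
    else if PySem.Int.mod n f = 0 ∧ PySem.Set.contains s (PySem.Int.floordiv n f) = true then true
    else scanFibs n s rest

def created_by_fib_numbers_alt (n : Int) : Bool :=
  let fibs := fibsUpTo n 1 1
  scanFibs n (PySem.Set.ofList fibs) fibs

-- ===== PRECONDITION & SPEC =====
def Spec_created_by_fib_numbers (n : Int) (out : Bool) : Prop := out = created_by_fib_numbers_alt n
instance (n : Int) (out : Bool) : Decidable (Spec_created_by_fib_numbers n out) := by unfold Spec_created_by_fib_numbers; infer_instance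

-- ===== CLAIM (what is proved, stated in full; the proofs are below) =====
def Claim_equal_created_by_fib_numbers : Prop := ∀ (n : Int), Dom_created_by_fib_numbers n → Spec_created_by_fib_numbers n (created_by_fib_numbers n)

-- ===== LEMMAS AND PROOFS =====

-- x is an element of the Fibonacci-like sequence a, b, a+b, …
inductive InFib : Int → Int → Int → Prop
  | here (a b : Int) : InFib a b a
  | there (a b x : Int) : InFib b (a + b) x → InFib a b x

-- (c, d) is a state reachable from state (a, b) by steps (a, b) ↦ (b, a+b)
inductive PairFrom : Int → Int → Int → Int → Prop
  | base (a b : Int) : PairFrom a b a b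
  | step (a b c d : Int) : PairFrom a b c d → PairFrom a b d (c + d)

theorem inFib_ge {a b x : Int} (h : InFib a b x) (ha : 0 < a) (hab : a ≤ b) : a ≤ x := by
  induction h with
  | here => omega
  | there a b x _ ih => have := ih (by omega) (by omega); omega

theorem pairFrom_bounds {a b c d : Int} (h : PairFrom a b c d) (ha : 0 < a) (hab : a ≤ b) :
    a ≤ c ∧ b ≤ d ∧ c ≤ d := by
  induction h with
  | base => omega
  | step c d _ ih => have := ih; omega

theorem pairFrom_lift {a b c d : Int} (h : PairFrom b (a + b) c d) : PairFrom a b c d := by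
  induction h with
  | base => exact PairFrom.step _ _ _ _ (PairFrom.base a b)
  | step c d _ ih => exact PairFrom.step _ _ _ _ ih

theorem pairFrom_shift {a b c d : Int} (h : PairFrom a b c d) :
    (c = a ∧ d = b) ∨ PairFrom b (a + b) c d := by
  induction h with
  | base => exact Or.inl ⟨rfl, rfl⟩
  | step c d _ ih =>
      rcases ih with ⟨h1, h2⟩ | h'
      · subst h1; subst h2; exact Or.inr (PairFrom.base _ _)
      · exact Or.inr (PairFrom.step _ _ _ _ h')

theorem inFib_of_pairFrom {a b c d x : Int} (h : PairFrom a b c d) (hx : InFib c d x) :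
    InFib a b x := by
  induction h with
  | base => exact hx
  | step c d _ ih => exact ih (InFib.there _ _ _ hx)

theorem inFib_snd {a b c d : Int} (h : PairFrom a b c d) : InFib a b d :=
  inFib_of_pairFrom h (InFib.there _ _ _ (InFib.here _ _))

theorem exists_pairFrom {a b x : Int} (h : InFib a b x) :
    x = a ∨ ∃ c, PairFrom a b c x := by
  induction h with
  | here => exact Or.inl rfl
  | there a b x _ ih =>
      rcases ih with h1 | ⟨c, hc⟩
      · exact Or.inr ⟨a, h1 ▸ PairFrom.base a b⟩
      · exact Or.inr ⟨c, pairFrom_lift hc⟩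

theorem pairFrom_peel {c d : Int} (h : PairFrom 1 1 c d) :
    ∀ y, InFib 1 1 y → d ≤ y → InFib c d y := by
  induction h with
  | base => intro y hy _; exact hy
  | step c d hp ih =>
      intro y hy hdy
      have hb := pairFrom_bounds hp (by omega) (by omega)
      have h1 : InFib c d y := ih y hy (by omega)
      cases h1 with
      | here => exact absurd hdy (by omega)
      | there _ _ _ h2 => exact h2

-- is_fib checks membership in the Fibonacci-like sequence from (a, b)
theorem isFib_imp (m a b : Int) (h : isFib m a b = true) (ha : 0 < a) (hab : a ≤ b) :
    InFib a b m := by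
  rw [isFib] at h
  split_ifs at h with h1 h2 h3
  · exact h2 ▸ InFib.here a b
  · exact InFib.there _ _ _ (isFib_imp m b (a + b) h (by omega) (by omega))
termination_by ((m + 1 - a).toNat + (m + 1 - b).toNat)
decreasing_by omega

theorem isFib_of {a b m : Int} (h : InFib a b m) (ha : 0 < a) (hab : a ≤ b) :
    isFib m a b = true := by
  induction h with
  | here a b => rw [isFib]; simp
  | there a b m hm ih =>
      have hbm : b ≤ m := inFib_ge hm (by omega) (by omega)
      rw [isFib]
      split_ifs with h1 h2 h3
      · rfl
      · exact ih (by omega) (by omega)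
      · omega
      · omega

-- elements of fibsUpTo are exactly the sequence elements ≤ n
theorem mem_fibsUpTo_imp (n a b x : Int) (h : x ∈ fibsUpTo n a b) : InFib a b x ∧ x ≤ n := by
  rw [fibsUpTo] at h
  split_ifs at h with h1
  · rcases List.mem_cons.mp h with h2 | h2
    · exact ⟨h2 ▸ InFib.here a b, by omega⟩
    · obtain ⟨h3, h4⟩ := mem_fibsUpTo_imp n b (a + b) x h2
      exact ⟨InFib.there _ _ _ h3, h4⟩
  · simp at h
termination_by ((n + 1 - a).toNat + (n + 1 - b).toNat)
decreasing_by omega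

theorem mem_fibsUpTo_of {n a b x : Int} (h : InFib a b x) (ha : 0 < a) (hab : a ≤ b)
    (hx : x ≤ n) : x ∈ fibsUpTo n a b := by
  induction h with
  | here a b => rw [fibsUpTo]; rw [dif_pos (by omega)]; exact List.mem_cons_self
  | there a b x hm ih =>
      have hbx : b ≤ x := inFib_ge hm (by omega) (by omega)
      rw [fibsUpTo]; rw [dif_pos (by omega)]
      exact List.mem_cons_of_mem _ (ih (by omega) (by omega) hx)

-- characterisation of A's loop
theorem cfLoop_imp (n a b : Int) (h : cfLoop n a b = true) (ha : 0 < a) (hab : a ≤ b) :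
    ∃ c d, PairFrom a b c d ∧ d * d ≤ n ∧ PySem.Int.mod n d = 0 ∧
      isFib (PySem.Int.floordiv n d) c d = true := by
  rw [cfLoop] at h
  split_ifs at h with h1 h2 h3
  · exact ⟨a, b, PairFrom.base a b, h1, h2.1, h2.2⟩
  · obtain ⟨c, d, hp, rest⟩ := cfLoop_imp n b (a + b) h (by omega) (by omega)
    exact ⟨c, d, pairFrom_lift hp, rest⟩
termination_by (n + 1 - b).toNat
decreasing_by
  have hbb : b ≤ b * b := le_mul_of_one_le_left (by omega) (by omega)
  omega

theorem cfLoop_of (n a b c d : Int) (hp : PairFrom a b c d) (ha : 0 < a) (hab : a ≤ b)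
    (hdd : d * d ≤ n) (hmod : PySem.Int.mod n d = 0)
    (hf : isFib (PySem.Int.floordiv n d) c d = true) : cfLoop n a b = true := by
  have hb := pairFrom_bounds hp ha hab
  have hbn : b * b ≤ n := le_trans (mul_le_mul (by omega) (by omega) (by omega) (by omega)) hdd
  rw [cfLoop]
  rw [dif_pos hbn]
  split_ifs with h1 h2
  · rfl
  · rcases pairFrom_shift hp with ⟨hc, hd⟩ | hp'
    · rw [hc, hd] at hf; rw [hd] at hmod; exact absurd ⟨hmod, hf⟩ h1
    · exact cfLoop_of n b (a + b) c d hp' (by omega) (by omega) hdd hmod hf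
  · omega
termination_by (n + 1 - b).toNat
decreasing_by
  have hbb : b ≤ b * b := le_mul_of_one_le_left (by omega) (by omega)
  omega

-- characterisation of B's scan (over the increasing Fibonacci list)
theorem scanFibs_fibsUpTo (n m : Int) (s : PySem.Set Int) (a b : Int) (ha : 0 < a)
    (hab : a ≤ b) :
    scanFibs n s (fibsUpTo m a b) = true ↔
      ∃ f ∈ fibsUpTo m a b, f * f ≤ n ∧ PySem.Int.mod n f = 0 ∧
        PySem.Set.contains s (PySem.Int.floordiv n f) = true := by
  rw [fibsUpTo]
  split_ifs with h1
  · rw [scanFibs]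
    split_ifs with h2 h3
    · simp only [false_iff]
      rintro ⟨f, hf, hff, -⟩
      rcases List.mem_cons.mp hf with h4 | h4
      · subst h4; omega
      · have h5 := (mem_fibsUpTo_imp m b (a + b) f h4).1
        have h6 : b ≤ f := inFib_ge h5 (by omega) (by omega)
        have : a * a ≤ f * f := mul_le_mul (by omega) (by omega) (by omega) (by omega)
        omega
    · simp only [true_iff]
      exact ⟨a, List.mem_cons_self, by omega, h3.1, h3.2⟩
    · rw [scanFibs_fibsUpTo n m s b (a + b) (by omega) (by omega)]
      constructor
      · rintro ⟨f, hf, rest⟩; exact ⟨f, List.mem_cons_of_mem _ hf, rest⟩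
      · rintro ⟨f, hf, rest⟩
        rcases List.mem_cons.mp hf with h4 | h4
        · subst h4; exact absurd ⟨rest.2.1, rest.2.2⟩ h3
        · exact ⟨f, h4, rest⟩
  · simp [scanFibs]
termination_by ((m + 1 - a).toNat + (m + 1 - b).toNat)
decreasing_by omega

-- both programs decide: ∃ Fibonacci f with f*f ≤ n, f ∣ n and n//f Fibonacci
theorem main_iff (n : Int) :
    created_by_fib_numbers n = true ↔ created_by_fib_numbers_alt n = true := by
  unfold created_by_fib_numbers created_by_fib_numbers_alt
  rw [scanFibs_fibsUpTo n n _ 1 1 (by omega) (by omega)]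
  constructor
  · intro h
    obtain ⟨c, d, hp, hdd, hmod, hf⟩ := cfLoop_imp n 1 1 h (by omega) (by omega)
    have hb := pairFrom_bounds hp (by omega) (by omega)
    have hd1 : 1 ≤ d := by omega
    have hdn : d ≤ n := le_trans (le_mul_of_one_le_left (by omega) hd1) hdd
    have hq : InFib c d (PySem.Int.floordiv n d) := isFib_imp _ _ _ hf (by omega) (by omega)
    have hq1 : InFib 1 1 (PySem.Int.floordiv n d) := inFib_of_pairFrom hp hq
    have hqle : PySem.Int.floordiv n d ≤ n := by
      have := (PySem.Int.floordiv_lt_iff_lt_mul (a := n) (q := n + 1) hd1).mpr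
        (by nlinarith)
      omega
    refine ⟨d, mem_fibsUpTo_of (inFib_snd hp) (by omega) (by omega) hdn, hdd, hmod, ?_⟩
    rw [PySem.Set.contains_iff, PySem.Set.mem_ofList]
    exact mem_fibsUpTo_of hq1 (by omega) (by omega) hqle
  · rintro ⟨f, hfmem, hff, hmod, hcont⟩
    have hfF : InFib 1 1 f := (mem_fibsUpTo_imp n 1 1 f hfmem).1
    have hf1 : 1 ≤ f := inFib_ge hfF (by omega) (by omega)
    rw [PySem.Set.contains_iff, PySem.Set.mem_ofList] at hcont
    have hqF : InFib 1 1 (PySem.Int.floordiv n f) := (mem_fibsUpTo_imp n 1 1 _ hcont).1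
    have hfq : f ≤ PySem.Int.floordiv n f :=
      (PySem.Int.le_floordiv_iff_mul_le (by omega)).mpr hff
    obtain ⟨c, hc⟩ : ∃ c, PairFrom 1 1 c f := by
      rcases exists_pairFrom hfF with h1 | h1
      · exact ⟨1, h1 ▸ PairFrom.base 1 1⟩
      · exact h1
    have hcb := pairFrom_bounds hc (by omega) (by omega)
    have hq : InFib c f (PySem.Int.floordiv n f) := pairFrom_peel hc _ hqF hfq
    exact cfLoop_of n 1 1 c f hc (by omega) (by omega) hff hmod
      (isFib_of hq (by omega) (by omega))

-- ===== VERDICT (by name: the statement is the Claim_ definition above) =====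
theorem created_by_fib_numbers_spec : Claim_equal_created_by_fib_numbers := by
  intro n _
  unfold Spec_created_by_fib_numbers
  have h := main_iff n
  cases hA : created_by_fib_numbers n <;> cases hB : created_by_fib_numbers_alt n <;>
    simp [hA, hB] at h ⊢
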